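-- pv_equiv track=rewrite | github.com/HWatashi/University_Labs | lab_6.3.py | common_products
-- ===== SOURCE A (Python) =====
-- def common_products(m, store_assortments):
--   A = set(store_assortments[0])
--
--   for i in range(1, m):
--     current_store_assortment = set(store_assortments[i])
--     A = A.intersection(current_store_assortment)
--
--   if not A:
--     A = list(store_assortments[0])
--     for i in range(1, m):
--       A = [product for product in A if product in store_assortments[i]]
--     A.sort()
--     A = set(A)
--
--   return A
-- ===== SOURCE B (Python) =====
-- def common_products(m, store_assortments):
--     # Count, for each product, how many of the stores 1..m-1 stock it
--     # (each store counted once per product via its distinct elements).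
--     counts = {}
--     for i in range(1, m):
--         for p in dict.fromkeys(store_assortments[i]):
--             counts[p] = counts.get(p, 0) + 1
--     # A product of store 0 is common iff it is in all of the other m-1 stores,
--     # i.e. its count reaches m-1 (for m <= 1 there is nothing to intersect away).
--     return {p for p in dict.fromkeys(store_assortments[0]) if counts.get(p, 0) >= m - 1}
-- ===== Notes on version B (the rewrite author's own statement) =====
-- stated objective: alternative
-- what changed: Replaces iterated pairwise set intersection (plus A's redundant sorted list-filter fallback with its quadratic list-membership scans) by one frequency-counting pass over the distinct elements of stores 1..m-1 and a threshold filter (count >= m-1) over the distinct products of store 0.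
import Mathlib
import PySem

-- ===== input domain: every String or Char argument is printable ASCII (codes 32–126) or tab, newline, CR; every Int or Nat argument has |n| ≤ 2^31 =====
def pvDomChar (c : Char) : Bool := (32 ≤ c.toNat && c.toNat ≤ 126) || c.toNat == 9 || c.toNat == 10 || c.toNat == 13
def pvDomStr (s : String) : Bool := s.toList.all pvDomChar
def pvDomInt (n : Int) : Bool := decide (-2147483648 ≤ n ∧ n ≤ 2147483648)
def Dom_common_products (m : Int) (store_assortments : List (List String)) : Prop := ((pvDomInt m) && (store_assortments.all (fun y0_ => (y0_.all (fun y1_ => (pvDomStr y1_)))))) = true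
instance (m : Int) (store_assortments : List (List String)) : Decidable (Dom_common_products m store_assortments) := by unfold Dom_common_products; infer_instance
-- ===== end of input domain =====

-- B replaces iterated pairwise set intersection by one counting pass over the distinct
-- elements of stores 1..m-1 plus a threshold filter (count ≥ m-1) over the distinct
-- products of store 0 (objective: alternative).
-- ===== PORT A =====
def common_products (m : Int) (store_assortments : List (List String)) : List String :=
  let A0 : PySem.Set String := PySem.Set.ofList (PySem.List.pyGetD store_assortments 0 [])
  let A1 : PySem.Set String := (PySem.List.pyRange 1 m 1).foldl
      (fun A i => PySem.Set.inter A (PySem.Set.ofList (PySem.List.pyGetD store_assortments i []))) A0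
  if A1 = [] then
    let L0 : List String := PySem.List.pyGetD store_assortments 0 []
    let L1 : List String := (PySem.List.pyRange 1 m 1).foldl
      (fun A i => A.filter (fun product => (PySem.List.pyGetD store_assortments i []).contains product)) L0
    PySem.Set.ofList (PySem.List.sorted L1 (fun x => x))
  else A1

-- ===== PORT B =====
def common_products_alt (m : Int) (store_assortments : List (List String)) : List String :=
  let counts : PySem.Dict String Int := (PySem.List.pyRange 1 m 1).foldl
      (fun d i => (PySem.List.dedup (PySem.List.pyGetD store_assortments i [])).foldl
        (fun d p => d.insert p (d.getD p 0 + 1)) d)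
      PySem.Dict.empty
  PySem.Set.ofList ((PySem.List.dedup (PySem.List.pyGetD store_assortments 0 [])).filter
      (fun p => m - 1 ≤ counts.getD p 0))

-- ===== PRECONDITION & SPEC =====
-- Pre_ excludes exactly the inputs where the Python A raises IndexError:
-- an empty store list (store_assortments[0]) or m exceeding the number of stores.
def Pre_common_products (m : Int) (store_assortments : List (List String)) : Prop :=
  store_assortments ≠ [] ∧ m ≤ (store_assortments.length : Int)
instance (m : Int) (store_assortments : List (List String)) : Decidable (Pre_common_products m store_assortments) := by unfold Pre_common_products; infer_instance
def pvWitness_common_products : Int × List (List String) := (2, [["a", "b"], ["b", "c"]])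

def Spec_common_products (m : Int) (store_assortments : List (List String)) (out : List String) : Prop := out = common_products_alt m store_assortments
instance (m : Int) (store_assortments : List (List String)) (out : List String) : Decidable (Spec_common_products m store_assortments out) := by unfold Spec_common_products; infer_instance

-- ===== CLAIM (what is proved, stated in full; the proofs are below) =====
def Claim_equal_common_products : Prop := ∀ (m : Int) (store_assortments : List (List String)), Dom_common_products m store_assortments → Pre_common_products m store_assortments → Spec_common_products m store_assortments (common_products m store_assortments)

-- ===== LEMMAS AND PROOFS =====
-- (PySem.Set String is definitionally List String; A's set accumulator is a list.)

theorem contains_ofList (t : List String) (x : String) :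
    (PySem.Set.ofList t).contains x = t.contains x := by
  by_cases h : x ∈ t <;> simp [PySem.Set.mem_ofList, h]

-- A's fallback loop is one filter by membership in every indexed store.
theorem foldl_filter_eq_filter {g : Int → List String} (l : List Int) (s : List String) :
    l.foldl (fun A i => A.filter (fun p => (g i).contains p)) s
      = s.filter (fun p => l.all (fun i => (g i).contains p)) := by
  induction l generalizing s with
  | nil => simp
  | cons i l ih =>
    simp only [List.foldl_cons, ih, List.filter_filter, List.all_cons]
    apply List.filter_congr; intro x _; rw [Bool.and_comm]

-- A's intersection loop is the same filter.
theorem foldl_inter_eq_filter {g : Int → List String} (l : List Int) (s : List String) :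
    l.foldl (fun A i => PySem.Set.inter A (PySem.Set.ofList (g i))) s
      = s.filter (fun p => l.all (fun i => (g i).contains p)) := by
  have h : (fun (A : List String) i => PySem.Set.inter A (PySem.Set.ofList (g i)))
      = fun A i => A.filter (fun p => (g i).contains p) := by
    funext A i
    simp only [PySem.Set.inter]
    apply List.filter_congr; intro x _; exact contains_ofList _ _
  rw [h, foldl_filter_eq_filter]

theorem foldl_add_eq_append (ys : List String) (s : PySem.Set String) :
    ys.foldl PySem.Set.add s = s ++ (PySem.Set.ofList ys).filter (fun x => !decide (x ∈ s)) := by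
  induction ys generalizing s with
  | nil => simp [PySem.Set.ofList, PySem.Set.empty]
  | cons y ys ih =>
    have hsingle : PySem.Set.add PySem.Set.empty y = [y] := by
      simp [PySem.Set.add, PySem.Set.empty]
    have hcons : PySem.Set.ofList (y :: ys) = y :: (PySem.Set.ofList ys).filter (fun x => !decide (x = y)) := by
      show List.foldl PySem.Set.add (PySem.Set.add PySem.Set.empty y) ys = _
      rw [hsingle, ih]
      simp
    rw [List.foldl_cons, ih, hcons]
    by_cases hmem : y ∈ s
    · have hy : PySem.Set.add s y = s := by simp [PySem.Set.add, hmem]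
      rw [hy, List.filter_cons]
      have : (!decide (y ∈ s)) = false := by simp [hmem]
      rw [this]
      simp only [List.filter_filter]
      congr 1
      apply List.filter_congr; intro x hx
      by_cases h1 : x ∈ s <;> by_cases h2 : x = y <;> simp_all
    · have hy : PySem.Set.add s y = s ++ [y] := by simp [PySem.Set.add, hmem]
      rw [hy, List.filter_cons]
      have : (!decide (y ∈ s)) = true := by simp [hmem]
      rw [this]
      simp only [List.filter_filter, List.append_assoc, List.singleton_append]
      congr 2
      apply List.filter_congr; intro x hx
      by_cases h1 : x ∈ s <;> by_cases h2 : x = y <;> simp_all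

theorem ofList_cons (x : String) (xs : List String) :
    PySem.Set.ofList (x :: xs) = x :: (PySem.Set.ofList xs).filter (fun y => !decide (y = x)) := by
  show List.foldl PySem.Set.add (PySem.Set.add PySem.Set.empty x) xs = _
  have hsingle : PySem.Set.add PySem.Set.empty x = [x] := by
    simp [PySem.Set.add, PySem.Set.empty]
  rw [hsingle, foldl_add_eq_append]
  simp

theorem ofList_of_nodup (xs : List String) (h : xs.Nodup) : PySem.Set.ofList xs = xs := by
  induction xs with
  | nil => rfl
  | cons x xs ih =>
    rw [ofList_cons, ih h.of_cons]
    congr 1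
    rw [List.filter_eq_self]
    intro y hy
    have : y ≠ x := fun hyx => (List.nodup_cons.mp h).1 (hyx ▸ hy)
    simp [this]

-- counting distinct occurrences over a list of stores
theorem count_flatMap_dedup {g : Int → List String} (l : List Int) (p : String) :
    (l.flatMap (fun i => PySem.List.dedup (g i))).count p
      = (l.filter (fun i => decide (p ∈ g i))).length := by
  induction l with
  | nil => simp
  | cons i l ih =>
    simp only [PySem.List.dedup_eq_ofList] at ih ⊢
    rw [List.flatMap_cons, List.count_append, List.filter_cons]
    have hc : (PySem.Set.ofList (g i)).count p = if p ∈ g i then 1 else 0 := by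
      by_cases h : p ∈ g i
      · have hn : (PySem.Set.ofList (g i)).Nodup := PySem.Set.nodup_ofList _
        have hm : p ∈ PySem.Set.ofList (g i) := (PySem.Set.mem_ofList _ _).mpr h
        have h1 := List.nodup_iff_count_le_one.mp hn p
        have h2 := List.count_pos_iff.mpr hm
        rw [if_pos h]; omega
      · rw [if_neg h, List.count_eq_zero]
        exact fun hm => h ((PySem.Set.mem_ofList _ _).mp hm)
    rw [hc]
    by_cases h : p ∈ g i
    · rw [if_pos h, ih]; simp [h]; omega
    · rw [if_neg h, ih]; simp [h]

-- B's nested loop is Counter of the flattened deduped stores.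
theorem nested_foldl_eq_counter {g : Int → List String} (l : List Int) :
    l.foldl (fun d i => (PySem.List.dedup (g i)).foldl
        (fun d p => d.insert p (d.getD p 0 + 1)) d) PySem.Dict.empty
      = PySem.Dict.counter (l.flatMap (fun i => PySem.List.dedup (g i))) := by
  rw [← PySem.Dict.foldl_insert_getD_add_one_eq_counter]
  rw [List.foldl_flatMap]

-- Both sides reduced to one canonical value: store 0's distinct products kept iff present in every store 1..m-1.
theorem common_products_eq (m : Int) (sa : List (List String)) :
    common_products m sa
      = (PySem.Set.ofList (PySem.List.pyGetD sa 0 [])).filter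
          (fun p => (PySem.List.pyRange 1 m 1).all
            (fun i => (PySem.List.pyGetD sa i []).contains p)) := by
  unfold common_products
  simp only [foldl_inter_eq_filter, foldl_filter_eq_filter]
  split_ifs with h
  · have hnil : (PySem.List.pyGetD sa 0 []).filter
        (fun p => (PySem.List.pyRange 1 m 1).all (fun i => (PySem.List.pyGetD sa i []).contains p)) = [] := by
      rw [List.filter_eq_nil_iff] at h ⊢
      intro a ha
      exact h a ((PySem.Set.mem_ofList _ _).mpr ha)
    rw [h, hnil]
    rfl
  · rfl

theorem common_products_alt_eq (m : Int) (sa : List (List String)) :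
    common_products_alt m sa
      = (PySem.Set.ofList (PySem.List.pyGetD sa 0 [])).filter
          (fun p => (PySem.List.pyRange 1 m 1).all
            (fun i => (PySem.List.pyGetD sa i []).contains p)) := by
  unfold common_products_alt
  dsimp only
  rw [nested_foldl_eq_counter]
  set r := PySem.List.pyRange 1 m 1 with hr
  set g : Int → List String := fun i => PySem.List.pyGetD sa i [] with hg
  have hrlen : (r.length : Int) = (m - 1).toNat := by
    rw [hr, PySem.List.length_pyRange_one]
  have hq : ∀ p, (decide (m - 1 ≤ (PySem.Dict.counter
          (r.flatMap (fun i => PySem.List.dedup (g i)))).getD p 0))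
      = r.all (fun i => (g i).contains p) := by
    intro p
    rw [PySem.Dict.getD_counter, count_flatMap_dedup]
    by_cases hall : ∀ i ∈ r, p ∈ g i
    · have hfe : r.filter (fun i => decide (p ∈ g i)) = r := by
        rw [List.filter_eq_self]; intro a ha; simpa using hall a ha
      have hra : r.all (fun i => (g i).contains p) = true := by
        rw [List.all_eq_true]; intro i hi
        simpa [List.contains_iff_mem] using hall i hi
      rw [hfe, hra]
      simp only [decide_eq_true_eq]
      omega
    · have hlt : (r.filter (fun i => decide (p ∈ g i))).length < r.length := by
        apply List.length_filter_lt_length_iff_exists.mpr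
        push_neg at hall
        obtain ⟨i, hi, hpi⟩ := hall
        exact ⟨i, hi, by simpa using hpi⟩
      have hm2 : 2 ≤ m := by
        obtain ⟨i, hi, _⟩ := (by push_neg at hall; exact hall : ∃ i ∈ r, p ∉ g i)
        have := PySem.List.mem_pyRange_one.mp (hr ▸ hi)
        omega
      have hra : r.all (fun i => (g i).contains p) = false := by
        rw [List.all_eq_false]
        push_neg at hall
        obtain ⟨i, hi, hpi⟩ := hall
        exact ⟨i, hi, by simpa [List.contains_iff_mem] using hpi⟩
      rw [hra, decide_eq_false]
      omega
  rw [List.filter_congr (fun x _ => hq x)]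
  rw [PySem.List.dedup_eq_ofList]
  exact ofList_of_nodup _ ((PySem.Set.nodup_ofList _).filter _)

-- ===== VERDICT (by name: the statement is the Claim_ definition above) =====
theorem common_products_spec : Claim_equal_common_products := by
  intro m sa _ _
  unfold Spec_common_products
  rw [common_products_eq m sa, common_products_alt_eq m sa]
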